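-- pv_equiv track=rewrite | github.com/Merlo02/us_foundation | model/training_debug.py | analytic_valid_patches_per_chunk
-- ===== SOURCE A (Python) =====
-- def analytic_valid_patches_per_chunk(
--     full_len_samples: int,
--     window_size: int,
--     target_patches: int,
-- ) -> tuple[int, list[int]]:
--     """Mirror HDF5/WebDataset chunking: valid patch counts per contiguous chunk."""
--     target_T = target_patches * window_size
--     if target_T <= 0:
--         return 0, []
--     num_chunks = max(1, (full_len_samples + target_T - 1) // target_T)
--     out: list[int] = []
--     for c in range(num_chunks):
--         chunk_start = c * target_T
--         remaining = full_len_samples - chunk_start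
--         valid = min(remaining, target_T) // window_size
--         out.append(int(valid))
--     return num_chunks, out
-- ===== SOURCE B (Python) =====
-- def analytic_valid_patches_per_chunk(
--     full_len_samples: int,
--     window_size: int,
--     target_patches: int,
-- ) -> tuple[int, list[int]]:
--     """Consume the signal chunk by chunk: while more than one full chunk remains,
--     emit a full chunk's patch count; then emit the final chunk's count.
--     The chunk count is the length of the list produced."""
--     target_T = target_patches * window_size
--     if target_T <= 0:
--         return 0, []
--     out = []
--     remaining = full_len_samples
--     while remaining > target_T:
--         out.append(target_patches)
--         remaining -= target_T
--     out.append(min(remaining, target_T) // window_size)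
--     return len(out), out
-- ===== Notes on version B (the rewrite author's own statement) =====
-- stated objective: alternative
-- what changed: Replaces A's indexed loop over a precomputed chunk count by a subtractive while-loop that consumes the remaining length chunk by chunk, emitting full-chunk counts until at most one chunk remains; the chunk count is derived as the length of the emitted list instead of a ceiling-division formula.
import Mathlib
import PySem

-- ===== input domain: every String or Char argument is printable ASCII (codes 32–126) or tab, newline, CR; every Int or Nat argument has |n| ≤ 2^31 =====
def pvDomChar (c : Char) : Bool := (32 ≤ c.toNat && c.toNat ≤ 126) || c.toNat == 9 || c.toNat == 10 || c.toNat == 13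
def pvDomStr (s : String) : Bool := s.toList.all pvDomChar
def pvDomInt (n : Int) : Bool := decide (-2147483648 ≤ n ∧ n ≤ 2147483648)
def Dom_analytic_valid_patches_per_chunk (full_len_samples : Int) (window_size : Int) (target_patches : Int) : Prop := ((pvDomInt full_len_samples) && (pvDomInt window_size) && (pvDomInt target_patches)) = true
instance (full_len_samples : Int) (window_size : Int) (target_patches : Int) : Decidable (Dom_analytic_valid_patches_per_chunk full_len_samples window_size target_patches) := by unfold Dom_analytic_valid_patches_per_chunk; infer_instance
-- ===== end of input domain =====

-- ===== PORT A =====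
-- B replaces A's indexed loop (count computed up front by ceiling division) with a
-- subtractive while-loop consuming the remaining length; return values proved equal below.
def analytic_valid_patches_per_chunk (full_len_samples : Int) (window_size : Int) (target_patches : Int) : Int × List Int :=
  let target_T := target_patches * window_size
  if target_T ≤ 0 then (0, [])
  else
    let num_chunks := max 1 (PySem.Int.floordiv (full_len_samples + target_T - 1) target_T)
    let out := (PySem.List.pyRange 0 num_chunks 1).foldl (fun acc c =>
      let chunk_start := c * target_T
      let remaining := full_len_samples - chunk_start
      let valid := PySem.Int.floordiv (min remaining target_T) window_size
      acc ++ [valid]) []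
    (num_chunks, out)

-- ===== PORT B =====
-- while remaining > target_T: emit target_patches, remaining -= target_T; then one final count.
-- The '0 < target_T' conjunct in the guard only ensures termination; at the call site it always holds.
def pvChunkWalk (target_T window_size target_patches remaining : Int) : List Int :=
  if h : target_T < remaining ∧ 0 < target_T then
    target_patches :: pvChunkWalk target_T window_size target_patches (remaining - target_T)
  else
    [PySem.Int.floordiv (min remaining target_T) window_size]
termination_by remaining.toNat
decreasing_by omega

def analytic_valid_patches_per_chunk_alt (full_len_samples : Int) (window_size : Int) (target_patches : Int) : Int × List Int :=
  let target_T := target_patches * window_size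
  if target_T ≤ 0 then (0, [])
  else
    let out := pvChunkWalk target_T window_size target_patches full_len_samples
    ((out.length : Int), out)

-- ===== PRECONDITION & SPEC =====
def Spec_analytic_valid_patches_per_chunk (full_len_samples : Int) (window_size : Int) (target_patches : Int) (out : Int × List Int) : Prop := out = analytic_valid_patches_per_chunk_alt full_len_samples window_size target_patches
instance (full_len_samples : Int) (window_size : Int) (target_patches : Int) (out : Int × List Int) : Decidable (Spec_analytic_valid_patches_per_chunk full_len_samples window_size target_patches out) := by unfold Spec_analytic_valid_patches_per_chunk; infer_instance

-- ===== CLAIM (what is proved, stated in full; the proofs are below) =====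
def Claim_equal_analytic_valid_patches_per_chunk : Prop := ∀ (full_len_samples : Int) (window_size : Int) (target_patches : Int), Dom_analytic_valid_patches_per_chunk full_len_samples window_size target_patches → Spec_analytic_valid_patches_per_chunk full_len_samples window_size target_patches (analytic_valid_patches_per_chunk full_len_samples window_size target_patches)

-- ===== LEMMAS AND PROOFS =====

-- exact division: (t*w) floordiv w = t for w ≠ 0
theorem pv_floordiv_mul_cancel (t w : Int) (hw : w ≠ 0) : PySem.Int.floordiv (t * w) w = t := by
  have hmod : PySem.Int.mod (t * w) w = 0 := by
    rw [PySem.Int.mod_eq_zero_iff_dvd]; exact dvd_mul_left w t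
  have h := PySem.Int.floordiv_mul_add_mod (t * w) w
  rw [hmod, add_zero] at h
  exact mul_right_cancel₀ hw h

-- closed form of B's while-loop: replicate of full chunks, then the last chunk's count
theorem pvChunkWalk_eq (T w t : Int) (hT : 0 < T) : ∀ r,
    pvChunkWalk T w t r =
      let n := max 1 (PySem.Int.floordiv (r + T - 1) T)
      List.replicate (n - 1).toNat t
        ++ [PySem.Int.floordiv (min (r - (n - 1) * T) T) w] := by
  intro r
  induction hk : r.toNat using Nat.strong_induction_on generalizing r with
  | _ k ih =>
    rw [pvChunkWalk]
    by_cases hr : T < r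
    · simp only [dif_pos (And.intro hr hT)]
      rw [ih (r - T).toNat (by omega) (r - T) rfl]
      simp only []
      set q := PySem.Int.floordiv (r + T - 1) T with hq
      set q' := PySem.Int.floordiv (r - T + T - 1) T with hq'
      have hb := (PySem.Int.floordiv_eq_iff_of_pos hT).mp hq'.symm
      have hstep : q = q' + 1 := by
        rw [hq, PySem.Int.floordiv_eq_iff_of_pos hT]
        constructor <;> nlinarith [hb.1, hb.2]
      have hq'ge : 1 ≤ q' := by
        rw [hq', (PySem.Int.le_floordiv_iff_mul_le hT)]; omega
      have hmax : max 1 q = q := by omega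
      have hmax' : max 1 q' = q' := by omega
      rw [hmax, hmax', hstep]
      have hrep : (q' + 1 - 1).toNat = (q' - 1).toNat + 1 := by omega
      rw [hrep, List.replicate_succ, List.cons_append]
      congr 3
      ring
    · have hcond : ¬(T < r ∧ 0 < T) := fun hc => hr hc.1
      rw [dif_neg hcond]
      have hle : r ≤ T := le_of_not_gt hr
      have hq1 : PySem.Int.floordiv (r + T - 1) T ≤ 1 := by
        have := (PySem.Int.floordiv_lt_iff_lt_mul hT (a := r + T - 1) (q := 2)).mpr (by omega)
        omega
      have hmax : max 1 (PySem.Int.floordiv (r + T - 1) T) = 1 := by omega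
      norm_num [hmax]

-- A's output equals the same closed form
theorem pvA_eq (f w t : Int) (hT : 0 < t * w) :
    analytic_valid_patches_per_chunk f w t =
      (max 1 (PySem.Int.floordiv (f + t * w - 1) (t * w)),
       List.replicate ((max 1 (PySem.Int.floordiv (f + t * w - 1) (t * w)) - 1)).toNat t
         ++ [PySem.Int.floordiv (min (f - (max 1 (PySem.Int.floordiv (f + t * w - 1) (t * w)) - 1) * (t * w)) (t * w)) w]) := by
  unfold analytic_valid_patches_per_chunk
  have hT' : ¬ t * w ≤ 0 := not_le.mpr hT
  simp only [if_neg hT']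
  have hw : w ≠ 0 := by intro h; rw [h, mul_zero] at hT; exact lt_irrefl 0 hT
  set T := t * w with hTdef
  set q := PySem.Int.floordiv (f + T - 1) T with hq
  set n := max 1 q with hn
  have hn1 : 1 ≤ n := le_max_left _ _
  refine Prod.ext rfl ?_
  simp only []
  rw [PySem.List.foldl_append_singleton_eq_map, List.nil_append]
  have hsplit : PySem.List.pyRange 0 n 1 =
      PySem.List.pyRange 0 (n - 1) 1 ++ PySem.List.pyRange (n - 1) n 1 :=
    PySem.List.pyRange_one_append 0 (n - 1) n (by omega) (by omega)
  have hlast : PySem.List.pyRange (n - 1) n 1 = [n - 1] := by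
    rw [PySem.List.pyRange_one_cons (show n - 1 < n by omega),
      PySem.List.pyRange_one_eq_nil (by omega)]
  rw [hsplit, hlast, List.map_append, List.map_cons, List.map_nil]
  congr 1
  have hfull : ∀ c ∈ PySem.List.pyRange 0 (n - 1) 1,
      PySem.Int.floordiv (min (f - c * T) T) w = t := by
    intro c hc
    rw [PySem.List.mem_pyRange_one] at hc
    have hn2 : 2 ≤ n := by omega
    have hqn : q = n := by omega
    have hbr := (PySem.Int.floordiv_eq_iff_of_pos hT).mp hq.symm
    have hrem : T ≤ f - c * T := by nlinarith [hbr.1, hc.1, hc.2, hqn]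
    rw [min_eq_right hrem]
    exact pv_floordiv_mul_cancel t w hw
  rw [List.map_congr_left hfull]
  rw [List.map_const']
  congr 1
  rw [PySem.List.length_pyRange_one]
  omega

theorem pv_main (f w t : Int) :
    analytic_valid_patches_per_chunk f w t = analytic_valid_patches_per_chunk_alt f w t := by
  by_cases hT : t * w ≤ 0
  · unfold analytic_valid_patches_per_chunk analytic_valid_patches_per_chunk_alt
    simp [hT]
  · have hTpos : 0 < t * w := lt_of_not_ge hT
    rw [pvA_eq f w t hTpos]
    unfold analytic_valid_patches_per_chunk_alt
    simp only [if_neg hT]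
    rw [pvChunkWalk_eq (t * w) w t hTpos f]
    simp only []
    set n := max 1 (PySem.Int.floordiv (f + t * w - 1) (t * w)) with hn
    have hn1 : 1 ≤ n := le_max_left _ _
    refine Prod.ext ?_ rfl
    simp only [List.length_append, List.length_replicate, List.length_cons,
      List.length_nil]
    push_cast
    omega

-- ===== VERDICT (by name: the statement is the Claim_ definition above) =====
theorem analytic_valid_patches_per_chunk_spec : Claim_equal_analytic_valid_patches_per_chunk := by
  intro f w t _
  unfold Spec_analytic_valid_patches_per_chunk
  exact pv_main f w t
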